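-- pv_equiv track=rewrite | github.com/Wuon/CCI | Others/findMidway.py | findMidway
-- ===== SOURCE A (Python) =====
-- from collections import deque
--
-- def findMidway(original):
--     start = set()
--     end = set()
--     edge = {}
--     for pair in original:
--         start.add(pair[0])
--         end.add(pair[1])
--         if pair[0] not in edge:
--             edge[pair[0]] = []
--         edge[pair[0]].append(pair[1])
--
--     startingPoints = start.difference(end)
--
--     output = []
--
--     for startingPoint in startingPoints:
--         queue = deque([([startingPoint], startingPoint)])
--         while queue:
--             curSequence, curPoint = queue.popleft()
--             for nextPoint in edge[curPoint]:
--                 if nextPoint in edge: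
--                     news = curSequence.copy()
--                     news.append(nextPoint)
--                     queue.append([news, nextPoint])
--                 else:
--                     output.append(curSequence[len(curSequence) // 2])
--     return output
-- ===== SOURCE B (Python) =====
-- from collections import deque
--
-- def findMidway(original):
--     edge = {}
--     ends = set()
--     for pair in original:
--         if pair[0] not in edge:
--             edge[pair[0]] = []
--         edge[pair[0]].append(pair[1])
--         ends.add(pair[1])
--
--     output = []
--     for s in {pair[0] for pair in original} - ends:
--         # BFS with parent pointers: paths are not copied; the midpoint is
--         # reconstructed by climbing parents only when a terminal is hit.
--         nodes = [(s, -1, 0)]          # (value, parent index, depth)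
--         queue = deque([0])
--         while queue:
--             i = queue.popleft()
--             v, _, d = nodes[i]
--             for nxt in edge[v]:
--                 if nxt in edge:
--                     nodes.append((nxt, i, d + 1))
--                     queue.append(len(nodes) - 1)
--                 else:
--                     j = i
--                     for _ in range(d - (d + 1) // 2):
--                         j = nodes[j][1]
--                     output.append(nodes[j][0])
--     return output
-- ===== Notes on version B (the rewrite author's own statement) =====
-- stated objective: alternative
-- what changed: B's BFS stores parent-pointer nodes (value, parent index, depth) and reconstructs each path's midpoint by climbing parents only when a terminal is reached, instead of A's copying of the whole prefix path for every enqueued node; it trades A's per-edge path copies for a node table and terminal-time climbs.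
import Mathlib
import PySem

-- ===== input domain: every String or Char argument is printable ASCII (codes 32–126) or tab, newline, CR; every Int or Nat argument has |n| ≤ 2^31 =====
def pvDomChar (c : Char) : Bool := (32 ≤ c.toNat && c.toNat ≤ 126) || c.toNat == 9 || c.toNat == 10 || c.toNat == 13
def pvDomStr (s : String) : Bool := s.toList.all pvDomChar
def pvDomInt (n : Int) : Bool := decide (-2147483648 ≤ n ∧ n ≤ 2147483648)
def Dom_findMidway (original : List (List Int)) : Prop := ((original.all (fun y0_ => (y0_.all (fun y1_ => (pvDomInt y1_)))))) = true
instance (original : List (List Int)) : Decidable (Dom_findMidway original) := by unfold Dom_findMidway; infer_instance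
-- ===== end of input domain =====

-- B replaces A's per-edge path copying with parent-pointer nodes and reconstructs each
-- midpoint only when a terminal is hit (objective: alternative algorithm, same cost on the
-- measured inputs). Both Pythons perform the same set operations, so the CPython int-set
-- iteration-order model below is shared by both ports.

-- ===== CPython int-set order model (shared helper: both Pythons build the same sets) =====
def pvHashInt (x : Int) : Nat := ((if x = -1 then -2 else x) % (18446744073709551616 : Int)).toNat

def pvProbeBlock (t : Array (Option Int)) (i : Nat) : Option Nat :=
  let probes := if i + 9 ≤ t.size - 1 then 9 else 0
  (List.range (probes + 1)).findSome?
    (fun k => if t.getD (i + k) (some 0) = none then some (i + k) else none)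

def pvProbeLoop (t : Array (Option Int)) : Nat → Nat → Nat → Nat
  | _, _, 0 => 0
  | i, perturb, fuel + 1 =>
    match pvProbeBlock t i with
    | some j => j
    | none =>
      let p := perturb >>> 5
      pvProbeLoop t ((i * 5 + 1 + p) % t.size) p fuel

def pvFindFree (t : Array (Option Int)) (x : Int) : Nat :=
  pvProbeLoop t (pvHashInt x % t.size) (pvHashInt x) (t.size + 64)

def pvCleanInsert (t : Array (Option Int)) (x : Int) : Array (Option Int) :=
  t.set! (pvFindFree t x) (some x)

def pvGrowSize : Nat → Nat → Nat
  | _, 0 => 8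
  | minused, f + 1 => if 8 * 2 ^ (64 - (f + 1)) ≤ minused then pvGrowSize minused f else 8 * 2 ^ (64 - (f + 1))

-- smallest table size 8·2^k strictly greater than minused (CPython set_table_resize)
def pvNewSize (minused : Nat) : Nat := pvGrowSize minused 64

def pvAddEntry (s : Array (Option Int) × Nat) (x : Int) : Array (Option Int) × Nat :=
  if s.1.toList.contains (some x) then s
  else
    let t := s.1.set! (pvFindFree s.1 x) (some x)
    let fill := s.2 + 1
    if fill * 5 < (t.size - 1) * 3 then (t, fill)
    else
      let minused := if fill > 50000 then fill * 2 else fill * 4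
      ((t.toList.filterMap id).foldl pvCleanInsert (Array.replicate (pvNewSize minused) none), fill)

def pvBuildSet (xs : List Int) : Array (Option Int) × Nat :=
  xs.foldl pvAddEntry (Array.replicate 8 none, 0)

def pvOrder (t : Array (Option Int)) : List Int := t.toList.filterMap id

-- order of set(xs).copy() (set_merge into a fresh set: possibly a different table size)
def pvCopyOrder (so : List Int) (tsize : Nat) : List Int :=
  let newsize := if so.length * 5 ≥ 21 then pvNewSize (so.length * 2) else 8
  if newsize = tsize then so
  else pvOrder (so.foldl pvCleanInsert (Array.replicate newsize none))

-- iteration order of set(xs).difference(set(ys)) in CPython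
def pvDiffOrder (xs ys : List Int) : List Int :=
  let s := pvBuildSet xs
  let so := pvOrder s.1
  if ys.dedup.length < so.length >>> 2 then
    (pvCopyOrder so s.1.size).filter (fun e => ¬ ys.contains e)
  else
    pvOrder ((so.foldl (fun r e => if ys.contains e then r else pvAddEntry r e)
      (Array.replicate 8 none, 0)).1)

-- ===== PORT A =====
-- queue of (curSequence, curPoint); per-pop fold over edge[curPoint]
def aBFS (edge : PySem.Dict Int (List Int)) : Nat → List (List Int × Int) → List Int → List Int
  | 0, _, out => out
  | _ + 1, [], out => out
  | fuel + 1, (seq, v) :: rest, out =>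
    let acc := (edge.getD v []).foldl
      (fun (acc : List (List Int × Int) × List Int) nxt =>
        if (edge.get? nxt).isSome then
          (acc.1 ++ [(seq ++ [nxt], nxt)], acc.2)
        else
          (acc.1, acc.2 ++ [PySem.List.pyGetD seq (PySem.Int.floordiv (seq.length : Int) 2) 0]))
      (rest, out)
    aBFS edge fuel acc.1 acc.2

def findMidway (original : List (List Int)) : List Int :=
  let st := original.foldl
    (fun (acc : List Int × List Int × PySem.Dict Int (List Int)) pair =>
      let a := PySem.List.pyGetD pair 0 0
      let b := PySem.List.pyGetD pair 1 0
      let e := if acc.2.2.contains a then acc.2.2 else acc.2.2.insert a []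
      (acc.1 ++ [a], acc.2.1 ++ [b], e.modify a [] (· ++ [b])))
    ([], [], PySem.Dict.empty)
  let startingPoints := pvDiffOrder st.1 st.2.1
  startingPoints.foldl
    (fun out s => aBFS st.2.2 (2 ^ original.length + 1) [([s], s)] out) []

-- ===== PORT B =====
-- nodes: (value, parent index, depth); queue of node indices; climb parents at terminals
def bClimb (nodes : List (Int × Int × Int)) (i d : Int) : Int :=
  (PySem.List.pyRange 0 (d - PySem.Int.floordiv (d + 1) 2) 1).foldl
    (fun j _ => (PySem.List.pyGetD nodes j (0, -1, 0)).2.1) i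

def bBFS (edge : PySem.Dict Int (List Int)) :
    Nat → List (Int × Int × Int) → List Int → List Int → List Int
  | 0, _, _, out => out
  | _ + 1, _, [], out => out
  | fuel + 1, nodes, i :: rest, out =>
    let nd := PySem.List.pyGetD nodes i (0, -1, 0)
    let acc := (edge.getD nd.1 []).foldl
      (fun (acc : List (Int × Int × Int) × List Int × List Int) nxt =>
        if (edge.get? nxt).isSome then
          let ns := acc.1 ++ [(nxt, i, nd.2.2 + 1)]
          (ns, acc.2.1 ++ [(ns.length : Int) - 1], acc.2.2)
        else
          let j := bClimb acc.1 i nd.2.2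
          (acc.1, acc.2.1, acc.2.2 ++ [(PySem.List.pyGetD acc.1 j (0, -1, 0)).1]))
      (nodes, rest, out)
    bBFS edge fuel acc.1 acc.2.1 acc.2.2

def findMidway_alt (original : List (List Int)) : List Int :=
  let st := original.foldl
    (fun (acc : PySem.Dict Int (List Int) × List Int) pair =>
      let a := PySem.List.pyGetD pair 0 0
      let b := PySem.List.pyGetD pair 1 0
      let e := if acc.1.contains a then acc.1 else acc.1.insert a []
      (e.modify a [] (· ++ [b]), acc.2 ++ [b]))
    (PySem.Dict.empty, [])
  let sources := pvDiffOrder (original.map (fun p => PySem.List.pyGetD p 0 0)) st.2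
  sources.foldl
    (fun out s => bBFS st.1 (2 ^ original.length + 1) [(s, -1, 0)] [0] out) []

-- ===== PRECONDITION & SPEC =====
-- Pre_ excludes exactly the inputs where Python A does not return: an inner list of length < 2
-- (IndexError on pair[0]/pair[1]) or a cycle reachable from a starting point (the BFS diverges).
def pvStepR (original : List (List Int)) (S : List Int) : List Int :=
  (S ++ original.filterMap
    (fun p => if PySem.List.pyGetD p 0 0 ∈ S then some (PySem.List.pyGetD p 1 0) else none)).dedup

def pvReach (original : List (List Int)) (init : List Int) : List Int :=
  (pvStepR original)^[2 * original.length] init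

def pvSrcs (original : List (List Int)) : List Int :=
  ((original.map (fun p => PySem.List.pyGetD p 0 0)).filter
    (fun k => ¬ (original.map (fun p => PySem.List.pyGetD p 1 0)).contains k)).dedup

def Pre_findMidway (original : List (List Int)) : Prop :=
  (∀ p ∈ original, 2 ≤ p.length) ∧
  ∀ v ∈ pvReach original (pvSrcs original),
    v ∉ pvReach original (original.filterMap
      (fun p => if PySem.List.pyGetD p 0 0 = v then some (PySem.List.pyGetD p 1 0) else none))
instance (original : List (List Int)) : Decidable (Pre_findMidway original) := by
  unfold Pre_findMidway; infer_instance

def pvWitness_findMidway : List (List Int) := [[1, 2], [1, 3], [3, 4]]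

def Spec_findMidway (original : List (List Int)) (out : List Int) : Prop := out = findMidway_alt original
instance (original : List (List Int)) (out : List Int) : Decidable (Spec_findMidway original out) := by unfold Spec_findMidway; infer_instance

-- ===== CLAIM (what is proved, stated in full; the proofs are below) =====
def Claim_equal_findMidway : Prop := ∀ (original : List (List Int)), Dom_findMidway original → Pre_findMidway original → Spec_findMidway original (findMidway original)

-- ===== LEMMAS AND PROOFS =====

-- chain of parent pointers in B's node array spelling out A's explicit path
inductive pvChain (nodes : List (Int × Int × Int)) : Int → List Int → Int → Int → Prop
  | base (i v p : Int) (h0 : 0 ≤ i) (hg : nodes[i.toNat]? = some (v, p, 0)) :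
      pvChain nodes i [v] v 0
  | step (i v p d : Int) (seq : List Int) (w : Int) (h0 : 0 ≤ i)
      (hg : nodes[i.toNat]? = some (v, p, d)) (hc : pvChain nodes p seq w (d - 1))
      (hd : d = (seq.length : Int)) : pvChain nodes i (seq ++ [v]) v d

def pvMatched (nodes : List (Int × Int × Int)) (qa : List (List Int × Int)) (qb : List Int) : Prop :=
  List.Forall₂ (fun e i => ∃ d, pvChain nodes i e.1 e.2 d) qa qb

def pvParent (nodes : List (Int × Int × Int)) (j : Int) : Int :=
  (PySem.List.pyGetD nodes j (0, -1, 0)).2.1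

theorem pvForall₂_append {α β : Type} {R : α → β → Prop} {l1 l1' : List α} {l2 l2' : List β}
    (h : List.Forall₂ R l1 l2) (h' : List.Forall₂ R l1' l2') :
    List.Forall₂ R (l1 ++ l1') (l2 ++ l2') := by
  induction h with
  | nil => exact h'
  | cons hh ht ih => exact List.Forall₂.cons hh ih

theorem pvChain_len {nodes i seq v d} (h : pvChain nodes i seq v d) :
    d = (seq.length : Int) - 1 := by
  induction h with
  | base => simp
  | step i v p d seq w h0 hg hc hd ih => simp; omega

theorem pvChain_get {nodes i seq v d} (h : pvChain nodes i seq v d) :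
    ∃ p, 0 ≤ i ∧ i.toNat < nodes.length ∧
      PySem.List.pyGetD nodes i (0, -1, 0) = (v, p, d) := by
  have key : ∃ p, nodes[i.toNat]? = some (v, p, d) ∧ 0 ≤ i := by
    cases h with
    | base i v p h0 hg => exact ⟨p, hg, h0⟩
    | step i v p d seq w h0 hg hc hd => exact ⟨p, hg, h0⟩
  obtain ⟨p, hg, h0⟩ := key
  have hlt : i.toNat < nodes.length := (List.getElem?_eq_some_iff.mp hg).1
  refine ⟨p, h0, hlt, ?_⟩
  rw [PySem.List.pyGetD_eq_getElem nodes (0, -1, 0) h0 (by omega)]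
  exact (List.getElem?_eq_some_iff.mp hg).2

theorem pvChain_append {nodes i seq v d} (x : Int × Int × Int)
    (h : pvChain nodes i seq v d) : pvChain (nodes ++ [x]) i seq v d := by
  induction h with
  | base i v p h0 hg =>
    exact pvChain.base i v p h0
      (by rw [List.getElem?_append_left (List.getElem?_eq_some_iff.mp hg).1]; exact hg)
  | step i v p d seq w h0 hg hc hd ih =>
    exact pvChain.step i v p d seq w h0
      (by rw [List.getElem?_append_left (List.getElem?_eq_some_iff.mp hg).1]; exact hg) ih hd

theorem pvMatched_append {nodes qa qb} (x : Int × Int × Int)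
    (h : pvMatched nodes qa qb) : pvMatched (nodes ++ [x]) qa qb :=
  List.Forall₂.imp (fun _ _ hp => by obtain ⟨d, hc⟩ := hp; exact ⟨d, pvChain_append x hc⟩) h

theorem pvChain_last {nodes i seq v d} (h : pvChain nodes i seq v d) :
    seq.getLast? = some v := by
  cases h with
  | base => rfl
  | step => simp

theorem pvChain_parent {nodes i seq v d} (h : pvChain nodes i seq v d) (hd : 1 ≤ d) :
    ∃ w, pvChain nodes (pvParent nodes i) seq.dropLast w (d - 1) := by
  cases h with
  | base i v p h0 hg => omega
  | step i v p d seq w h0 hg hc hdd =>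
    have h0' : 0 ≤ i := h0
    have hlt : i.toNat < nodes.length := (List.getElem?_eq_some_iff.mp hg).1
    have hpv : pvParent nodes i = p := by
      unfold pvParent
      rw [PySem.List.pyGetD_eq_getElem nodes (0, -1, 0) h0' (by omega)]
      rw [(List.getElem?_eq_some_iff.mp hg).2]
    rw [hpv, List.dropLast_concat]
    exact ⟨w, hc⟩

theorem pvChain_iter {nodes i seq v d} (h : pvChain nodes i seq v d) :
    ∀ k : Nat, (k : Int) ≤ d →
      ∃ w, pvChain nodes ((pvParent nodes)^[k] i) (seq.take (seq.length - k)) w (d - k) := by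
  intro k
  induction k generalizing i seq v d with
  | zero =>
    intro _
    simpa [List.take_length] using ⟨v, h⟩
  | succ k ih =>
    intro hk
    obtain ⟨w, hw⟩ := pvChain_parent h (by omega)
    obtain ⟨u, hu⟩ := ih hw (by
      have := pvChain_len h
      omega)
    refine ⟨u, ?_⟩
    rw [Function.iterate_succ_apply]
    have htake : seq.dropLast.take (seq.dropLast.length - k) = seq.take (seq.length - (k + 1)) := by
      rw [List.length_dropLast, List.dropLast_eq_take, List.take_take]
      congr 1
      omega
    rw [htake] at hu
    have : d - 1 - (k : Int) = d - ((k : Nat) + 1 : Nat) := by push_cast; ring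
    rwa [this] at hu

theorem foldl_const_iterate {α β : Type} (f : α → α) (x : α) (l : List β) :
    l.foldl (fun j _ => f j) x = f^[l.length] x := by
  induction l generalizing x with
  | nil => rfl
  | cons y l ih => simp [ih (f x), Function.iterate_succ_apply]

theorem bClimb_eq_iter (nodes : List (Int × Int × Int)) (i d : Int) (h0 : 0 ≤ d) :
    bClimb nodes i d = (pvParent nodes)^[(d - PySem.Int.floordiv (d + 1) 2).toNat] i := by
  unfold bClimb
  rw [show (fun (j : Int) (_ : Int) => (PySem.List.pyGetD nodes j (0, -1, 0)).2.1) =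
        (fun j _ => pvParent nodes j) from rfl]
  rw [foldl_const_iterate (pvParent nodes) i]
  rw [PySem.List.length_pyRange_one]
  congr 1
  omega

-- midpoint reconstruction agrees with A's direct indexing
theorem climb_mid {nodes i seq v d} (h : pvChain nodes i seq v d) :
    (PySem.List.pyGetD nodes (bClimb nodes i d) (0, -1, 0)).1 =
      PySem.List.pyGetD seq (PySem.Int.floordiv (seq.length : Int) 2) 0 := by
  have hlen := pvChain_len h
  have hL : 1 ≤ seq.length := by
    cases h with
    | base => simp
    | step => simp
  have h0 : 0 ≤ d := by omega
  have hfd : PySem.Int.floordiv (d + 1) 2 = (d + 1) / 2 :=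
    PySem.Int.floordiv_eq_ediv_of_pos (by norm_num)
  set k : Nat := (d - PySem.Int.floordiv (d + 1) 2).toNat with hk
  have hkd : (k : Int) ≤ d := by rw [hk, hfd]; omega
  obtain ⟨w, hw⟩ := pvChain_iter h k hkd
  rw [bClimb_eq_iter nodes i d h0]
  obtain ⟨p, hp0, hplt, hpg⟩ := pvChain_get hw
  rw [hpg]
  -- B's side is w; compute A's side
  have hlast := pvChain_last hw
  have hm : seq.length - k - 1 < seq.length - k := by
    rw [hk, hfd]; omega
  have htk : (seq.take (seq.length - k)).getLast? = seq[seq.length - k - 1]? := by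
    rw [List.getLast?_eq_getElem?, List.length_take]
    have hmin : min (seq.length - k) seq.length = seq.length - k := by omega
    rw [hmin]
    simp [List.getElem?_take, hm]
  rw [htk] at hlast
  have hidx : PySem.Int.floordiv ((seq.length : Nat) : Int) 2 = ((seq.length / 2 : Nat) : Int) := by
    rw [PySem.Int.floordiv_eq_ediv_of_pos (by norm_num)]
    exact_mod_cast (Int.natCast_div seq.length 2).symm
  rw [hidx, PySem.List.pyGetD_natCast]
  have heq : seq.length - k - 1 = seq.length / 2 := by
    rw [hk, hfd]; omega
  rw [heq] at hlast
  simp [List.getD, hlast]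

theorem fold_eq (edge : PySem.Dict Int (List Int)) (seq : List Int) (v i d : Int)
    (succs : List Int) :
    ∀ (nodes : List (Int × Int × Int)) qa qb (out : List Int),
      pvMatched nodes qa qb → pvChain nodes i seq v d →
      (succs.foldl
        (fun (acc : List (List Int × Int) × List Int) nxt =>
          if (edge.get? nxt).isSome then
            (acc.1 ++ [(seq ++ [nxt], nxt)], acc.2)
          else
            (acc.1, acc.2 ++ [PySem.List.pyGetD seq (PySem.Int.floordiv (seq.length : Int) 2) 0]))
        (qa, out)).2 =
      (succs.foldl
        (fun (acc : List (Int × Int × Int) × List Int × List Int) nxt =>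
          if (edge.get? nxt).isSome then
            let ns := acc.1 ++ [(nxt, i, d + 1)]
            (ns, acc.2.1 ++ [(ns.length : Int) - 1], acc.2.2)
          else
            let j := bClimb acc.1 i d
            (acc.1, acc.2.1, acc.2.2 ++ [(PySem.List.pyGetD acc.1 j (0, -1, 0)).1]))
        (nodes, qb, out)).2.2 ∧
      pvMatched (succs.foldl
        (fun (acc : List (Int × Int × Int) × List Int × List Int) nxt =>
          if (edge.get? nxt).isSome then
            let ns := acc.1 ++ [(nxt, i, d + 1)]
            (ns, acc.2.1 ++ [(ns.length : Int) - 1], acc.2.2)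
          else
            let j := bClimb acc.1 i d
            (acc.1, acc.2.1, acc.2.2 ++ [(PySem.List.pyGetD acc.1 j (0, -1, 0)).1]))
        (nodes, qb, out)).1
        (succs.foldl
        (fun (acc : List (List Int × Int) × List Int) nxt =>
          if (edge.get? nxt).isSome then
            (acc.1 ++ [(seq ++ [nxt], nxt)], acc.2)
          else
            (acc.1, acc.2 ++ [PySem.List.pyGetD seq (PySem.Int.floordiv (seq.length : Int) 2) 0]))
        (qa, out)).1
        (succs.foldl
        (fun (acc : List (Int × Int × Int) × List Int × List Int) nxt =>
          if (edge.get? nxt).isSome then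
            let ns := acc.1 ++ [(nxt, i, d + 1)]
            (ns, acc.2.1 ++ [(ns.length : Int) - 1], acc.2.2)
          else
            let j := bClimb acc.1 i d
            (acc.1, acc.2.1, acc.2.2 ++ [(PySem.List.pyGetD acc.1 j (0, -1, 0)).1]))
        (nodes, qb, out)).2.1 := by
  induction succs with
  | nil => exact fun nodes qa qb out hm hc => ⟨rfl, hm⟩
  | cons nxt rest ih =>
    intro nodes qa qb out hm hc
    simp only [List.foldl_cons]
    by_cases hsome : (edge.get? nxt).isSome
    · simp only [hsome, if_true]
      have hd1 : d + 1 = (seq.length : Int) := by have := pvChain_len hc; omega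
      have hnew : pvChain (nodes ++ [(nxt, i, d + 1)]) ((nodes.length : Int)) (seq ++ [nxt]) nxt (d + 1) := by
        refine pvChain.step _ nxt i (d + 1) seq v (by positivity) ?_ ?_ hd1
        · rw [Int.toNat_natCast]
          exact List.getElem?_concat_length
        · rw [add_sub_cancel_right]
          exact pvChain_append _ hc
      have hm' : pvMatched (nodes ++ [(nxt, i, d + 1)])
          (qa ++ [(seq ++ [nxt], nxt)]) (qb ++ [((nodes ++ [(nxt, i, d + 1)]).length : Int) - 1]) := by
        refine pvForall₂_append (pvMatched_append _ hm) ?_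
        have : ((nodes ++ [(nxt, i, d + 1)]).length : Int) - 1 = (nodes.length : Int) := by
          simp
        rw [this]
        exact List.forall₂_cons.mpr ⟨⟨d + 1, hnew⟩, List.Forall₂.nil⟩
      exact ih _ _ _ _ hm' (pvChain_append _ hc)
    · rw [Bool.not_eq_true] at hsome
      simp only [hsome, Bool.false_eq_true, if_false]
      rw [climb_mid hc]
      exact ih _ _ _ _ hm hc


theorem bfs_eq (edge : PySem.Dict Int (List Int)) :
    ∀ (fuel : Nat) (nodes : List (Int × Int × Int)) qa qb (out : List Int),
      pvMatched nodes qa qb →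
      aBFS edge fuel qa out = bBFS edge fuel nodes qb out := by
  intro fuel
  induction fuel with
  | zero => intro nodes qa qb out hm; rfl
  | succ fuel ih =>
    intro nodes qa qb out hm
    cases qa with
    | nil =>
      cases hm
      rfl
    | cons e qa' =>
      cases qb with
      | nil => exact absurd hm (by simp [pvMatched])
      | cons i qb' =>
        obtain ⟨e1, e2⟩ := e
        obtain ⟨⟨d, hc⟩, hrest⟩ := List.forall₂_cons.mp hm
        obtain ⟨p, hp0, hplt, hpg⟩ := pvChain_get hc
        show aBFS edge (fuel + 1) ((e1, e2) :: qa') out = bBFS edge (fuel + 1) nodes (i :: qb') out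
        simp only [aBFS, bBFS, hpg]
        obtain ⟨ho, hq⟩ := fold_eq edge e1 e2 i d (edge.getD e2 []) nodes qa' qb' out hrest hc
        rw [ho]
        exact ih _ _ _ _ hq

theorem build_eq : ∀ (orig : List (List Int)) (a b : List Int) (dct : PySem.Dict Int (List Int)),
    (orig.foldl
      (fun (acc : List Int × List Int × PySem.Dict Int (List Int)) pair =>
        let x := PySem.List.pyGetD pair 0 0
        let y := PySem.List.pyGetD pair 1 0
        let e := if acc.2.2.contains x then acc.2.2 else acc.2.2.insert x []
        (acc.1 ++ [x], acc.2.1 ++ [y], e.modify x [] (· ++ [y])))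
      (a, b, dct)) =
    (a ++ orig.map (fun p => PySem.List.pyGetD p 0 0),
      (orig.foldl
        (fun (acc : PySem.Dict Int (List Int) × List Int) pair =>
          let x := PySem.List.pyGetD pair 0 0
          let y := PySem.List.pyGetD pair 1 0
          let e := if acc.1.contains x then acc.1 else acc.1.insert x []
          (e.modify x [] (· ++ [y]), acc.2 ++ [y]))
        (dct, b)).2,
      (orig.foldl
        (fun (acc : PySem.Dict Int (List Int) × List Int) pair =>
          let x := PySem.List.pyGetD pair 0 0
          let y := PySem.List.pyGetD pair 1 0
          let e := if acc.1.contains x then acc.1 else acc.1.insert x []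
          (e.modify x [] (· ++ [y]), acc.2 ++ [y]))
        (dct, b)).1) := by
  intro orig
  induction orig with
  | nil => simp
  | cons p rest ih =>
    intro a b dct
    simp only [List.foldl_cons, List.map_cons]
    rw [ih]
    simp [List.append_assoc]

theorem sources_fold_eq (E : PySem.Dict Int (List Int)) (fuel : Nat) :
    ∀ (srcs out : List Int),
      srcs.foldl (fun out s => aBFS E fuel [([s], s)] out) out =
      srcs.foldl (fun out s => bBFS E fuel [(s, -1, 0)] [0] out) out := by
  intro srcs
  induction srcs with
  | nil => intro out; rfl
  | cons s rest ih =>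
    intro out
    simp only [List.foldl_cons]
    rw [bfs_eq E fuel [(s, -1, 0)] [([s], s)] [0] out
      (List.forall₂_cons.mpr ⟨⟨0, pvChain.base 0 s (-1) le_rfl rfl⟩, List.Forall₂.nil⟩)]
    exact ih _
-- ===== VERDICT (by name: the statement is the Claim_ definition above) =====
theorem findMidway_spec : Claim_equal_findMidway := by
  intro original _ _
  unfold Spec_findMidway
  simp only [findMidway, findMidway_alt]
  rw [build_eq original [] [] PySem.Dict.empty]
  simp only [List.nil_append]
  exact sources_fold_eq _ _ _ _
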